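-- pv_equiv track=rewrite | github.com/spritt/NLP | preprocess_1.py | mergeNots
-- ===== SOURCE A (Python) =====
-- def mergeNots(sentOfTokens):
-- 	newSent = []
-- 	isNot = False
-- 	for toktag in sentOfTokens:
-- 		tok, tag = toktag
-- 		if tok == 'not':
-- 			isNot = True
-- 		else:
-- 			if isNot:
-- 				newSent.append(('not-' + tok,tag))
-- 				isNot = False
-- 			else:
-- 				newSent.append(toktag)
-- 	return newSent
-- ===== SOURCE B (Python) =====
-- def mergeNots(sentOfTokens):
--     newSent = []
--     it = iter(sentOfTokens)
--     for toktag in it: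
--         tok, tag = toktag
--         if tok != 'not':
--             newSent.append(toktag)
--         else:
--             try:
--                 nt, ntag = next(it)
--                 while nt == 'not':
--                     nt, ntag = next(it)
--                 newSent.append(('not-' + nt, ntag))
--             except StopIteration:
--                 break
--     return newSent
-- ===== Notes on version B (the rewrite author's own statement) =====
-- stated objective: alternative
-- what changed: Replaces the carried isNot boolean state machine with an iterator consume-ahead decomposition: on seeing 'not' a nested loop pulls following tokens, skipping further 'not's, and emits the prefixed token directly.
import Mathlib
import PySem

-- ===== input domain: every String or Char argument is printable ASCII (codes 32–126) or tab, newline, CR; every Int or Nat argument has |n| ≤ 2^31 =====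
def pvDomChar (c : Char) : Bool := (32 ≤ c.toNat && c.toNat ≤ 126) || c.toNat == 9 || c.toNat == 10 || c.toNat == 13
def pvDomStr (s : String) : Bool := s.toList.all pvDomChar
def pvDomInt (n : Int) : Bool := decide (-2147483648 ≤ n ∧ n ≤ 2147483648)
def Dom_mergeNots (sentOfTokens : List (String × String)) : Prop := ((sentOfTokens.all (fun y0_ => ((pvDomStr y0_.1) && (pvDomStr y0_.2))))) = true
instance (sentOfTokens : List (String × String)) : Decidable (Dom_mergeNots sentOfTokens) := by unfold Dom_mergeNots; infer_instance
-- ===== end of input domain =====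

-- B replaces A's carried isNot flag with an iterator consume-ahead decomposition (objective: alternative).

-- ===== PORT A =====
-- A: one fold over the tokens carrying (newSent, isNot).
def mergeNots (sentOfTokens : List (String × String)) : List (String × String) :=
  (sentOfTokens.foldl
    (fun (st : List (String × String) × Bool) toktag =>
      let tok := toktag.1
      let tag := toktag.2
      if tok = "not" then (st.1, true)
      else if st.2 then (st.1 ++ [("not-" ++ tok, tag)], false)
      else (st.1 ++ [toktag], st.2))
    ([], false)).1

-- ===== PORT B =====
-- B: structural recursion; on "not", a consume-ahead helper (the nested next(it) loop)
-- skips further "not"s and emits the prefixed token; StopIteration = empty rest.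
mutual
def mergeNotsAltGo : List (String × String) → List (String × String)
  | [] => []
  | (tok, tag) :: rest =>
    if tok ≠ "not" then (tok, tag) :: mergeNotsAltGo rest
    else mergeNotsAltNot rest

def mergeNotsAltNot : List (String × String) → List (String × String)
  | [] => []   -- StopIteration: trailing 'not' dropped
  | (nt, ntag) :: rest =>
    if nt = "not" then mergeNotsAltNot rest
    else ("not-" ++ nt, ntag) :: mergeNotsAltGo rest
end

def mergeNots_alt (sentOfTokens : List (String × String)) : List (String × String) :=
  mergeNotsAltGo sentOfTokens

-- ===== PRECONDITION & SPEC =====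
def Spec_mergeNots (sentOfTokens : List (String × String)) (out : List (String × String)) : Prop := out = mergeNots_alt sentOfTokens
instance (sentOfTokens : List (String × String)) (out : List (String × String)) : Decidable (Spec_mergeNots sentOfTokens out) := by unfold Spec_mergeNots; infer_instance

-- ===== CLAIM (what is proved, stated in full; the proofs are below) =====
def Claim_equal_mergeNots : Prop := ∀ (sentOfTokens : List (String × String)), Dom_mergeNots sentOfTokens → Spec_mergeNots sentOfTokens (mergeNots sentOfTokens)

-- ===== LEMMAS AND PROOFS =====

-- Invariant for A's fold: from state (acc, false) it produces acc ++ go s; from (acc, true), acc ++ not s.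
theorem mergeNots_fold_inv (s : List (String × String)) :
    ∀ (acc : List (String × String)),
      ((s.foldl
        (fun (st : List (String × String) × Bool) toktag =>
          let tok := toktag.1
          let tag := toktag.2
          if tok = "not" then (st.1, true)
          else if st.2 then (st.1 ++ [("not-" ++ tok, tag)], false)
          else (st.1 ++ [toktag], st.2))
        (acc, false)).1 = acc ++ mergeNotsAltGo s)
      ∧ ((s.foldl
        (fun (st : List (String × String) × Bool) toktag =>
          let tok := toktag.1
          let tag := toktag.2
          if tok = "not" then (st.1, true)
          else if st.2 then (st.1 ++ [("not-" ++ tok, tag)], false)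
          else (st.1 ++ [toktag], st.2))
        (acc, true)).1 = acc ++ mergeNotsAltNot s) := by
  induction s with
  | nil => intro acc; simp [mergeNotsAltGo, mergeNotsAltNot]
  | cons hd tl ih =>
    intro acc
    obtain ⟨tok, tag⟩ := hd
    by_cases h : tok = "not" <;>
      simp [mergeNotsAltGo, mergeNotsAltNot, h, List.foldl_cons,
        (ih acc).2, (ih (acc ++ [("not-" ++ tok, tag)])).1, (ih (acc ++ [(tok, tag)])).1]

-- ===== VERDICT (by name: the statement is the Claim_ definition above) =====
theorem mergeNots_spec : Claim_equal_mergeNots := by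
  intro s _
  unfold Spec_mergeNots mergeNots mergeNots_alt
  simpa using (mergeNots_fold_inv s []).1
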